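-- pv_equiv track=rewrite | github.com/anyl92/ALGORITHM | test/COS/6.py | solution
-- ===== SOURCE A (Python) =====
-- import collections
--
-- def solution(n, garden):
--     answer = 0
--     flower_list = collections.deque([])
--     for i in range(n):
--         for j in range(n):
--             if garden[i][j]:
--                 flower_list.append([i, j])
--
--     delta = [[1, 0], [0, 1], [-1, 0], [0, -1]]
--     while flower_list:
--         for _ in range(len(flower_list)):
--             y, x = flower_list.popleft()
--             for dy, dx in delta:
--                 yy, xx = y + dy, x + dx
--                 if 0 <= yy < n and 0 <= xx < n:
--                     if not garden[yy][xx]: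
--                         garden[yy][xx] = 1
--                         flower_list.append([yy, xx])
--         answer += 1
--
--     return answer - 1
-- ===== SOURCE B (Python) =====
-- def solution(n, garden):
--     # Computes the same return value as A without a queue: repeatedly dilate the
--     # set of flower cells until it stops growing; the number of dilation rounds
--     # that were needed (minus the final stalled check... see mapping below)
--     # equals A's level count minus one.  (A mutates `garden` in place; B does not:
--     # the equivalence is about the return value only.)
--     delta = ((1, 0), (0, 1), (-1, 0), (0, -1))
--     cur = {(i, j) for i in range(n) for j in range(n) if garden[i][j]}
--     prev = set()
--     k = 0
--     while cur != prev:
--         prev = cur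
--         grown = set(cur)
--         for (y, x) in cur:
--             for dy, dx in delta:
--                 yy, xx = y + dy, x + dx
--                 if 0 <= yy < n and 0 <= xx < n:
--                     grown.add((yy, xx))
--         cur = grown
--         k += 1
--     return k - 1
-- ===== Notes on version B (the rewrite author's own statement) =====
-- stated objective: alternative
-- what changed: A runs a multi-source BFS with an explicit deque processed in level-sized batches while mutating the grid; B keeps a set of flower positions and repeatedly dilates the whole set by its in-bounds neighbours until it stops growing, counting the rounds (A mutates garden in place, B does not; the equivalence is about the return value).
import Mathlib
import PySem

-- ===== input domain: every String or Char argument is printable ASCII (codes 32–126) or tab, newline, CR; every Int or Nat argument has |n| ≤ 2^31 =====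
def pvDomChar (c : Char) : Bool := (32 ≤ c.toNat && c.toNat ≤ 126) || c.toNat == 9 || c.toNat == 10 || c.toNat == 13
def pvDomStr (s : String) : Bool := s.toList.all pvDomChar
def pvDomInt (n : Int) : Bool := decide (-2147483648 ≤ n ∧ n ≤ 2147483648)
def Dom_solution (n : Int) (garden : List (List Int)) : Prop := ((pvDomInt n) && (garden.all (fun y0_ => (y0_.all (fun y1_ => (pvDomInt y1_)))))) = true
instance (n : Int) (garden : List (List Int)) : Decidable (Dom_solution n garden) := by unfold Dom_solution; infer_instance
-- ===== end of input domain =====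

-- B replaces A's level-batched BFS queue with repeated whole-set dilation of the flower
-- set until it stalls (objective: alternative).  A mutates `garden` in place, B does not:
-- the equivalence proved is about the return value only.

-- shared small helpers: the inline bounds test `0 <= yy < n and 0 <= xx < n`,
-- `garden[i][j]` (indices valid under Pre_; the defaults are never used there),
-- and the literal `delta` list both Pythons define
abbrev pvInb (n y x : Int) : Prop := 0 ≤ y ∧ y < n ∧ 0 ≤ x ∧ x < n
def pvRow (g : List (List Int)) (i : Int) : List Int := PySem.List.pyGetD g i []
def pvCell (g : List (List Int)) (i j : Int) : Int := PySem.List.pyGetD (pvRow g i) j 0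
def pvDelta : List (Int × Int) := [(1, 0), (0, 1), (-1, 0), (0, -1)]

-- ===== PORT A =====
-- the double loop collecting flower cells into the deque
def pvFlowers (n : Int) (garden : List (List Int)) : List (Int × Int) :=
  (PySem.List.pyRange 0 n).foldl (fun acc i =>
    (PySem.List.pyRange 0 n).foldl (fun acc j =>
      if pvCell garden i j ≠ 0 then acc ++ [(i, j)] else acc) acc) []

-- garden[yy][xx] = 1
def pvMark (g : List (List Int)) (y x : Int) : List (List Int) :=
  g.set y.toNat ((pvRow g y).set x.toNat 1)

-- the body for one popped cell c: the four-direction loop over delta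
def pvStepCell (n : Int) (st : List (List Int) × List (Int × Int)) (c : Int × Int) :
    List (List Int) × List (Int × Int) :=
  pvDelta.foldl (fun st d =>
    if pvInb n (c.1 + d.1) (c.2 + d.2) then
      if pvCell st.1 (c.1 + d.1) (c.2 + d.2) = 0 then
        (pvMark st.1 (c.1 + d.1) (c.2 + d.2), st.2 ++ [(c.1 + d.1, c.2 + d.2)])
      else st
    else st) st

-- `for _ in range(len(flower_list)): popleft …`: pops exactly the current level,
-- the appended cells are what remains in the deque afterwards
def pvLevel (n : Int) (g : List (List Int)) (q : List (Int × Int)) :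
    List (List Int) × List (Int × Int) :=
  q.foldl (pvStepCell n) (g, [])

-- `while flower_list:` — fuel n²+1 only makes the recursion total; it is not
-- exhausted on Pre_ inputs (every round but the last strictly grows the filled set)
def pvLoopA (n : Int) : Nat → List (List Int) → List (Int × Int) → Int → Int
  | 0, _, _, answer => answer - 1
  | fuel+1, g, q, answer =>
    if q = [] then answer - 1
    else
      let st := pvLevel n g q
      pvLoopA n fuel st.1 st.2 (answer + 1)

def solution (n : Int) (garden : List (List Int)) : Int :=
  pvLoopA n (n.toNat * n.toNat + 1) garden (pvFlowers n garden) 0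

-- ===== PORT B =====
-- the set comprehension {(i, j) for i in range(n) for j in range(n) if garden[i][j]}
def pvInit (n : Int) (garden : List (List Int)) : PySem.Set (Int × Int) :=
  (PySem.List.pyRange 0 n).foldl (fun s i =>
    (PySem.List.pyRange 0 n).foldl (fun s j =>
      if pvCell garden i j ≠ 0 then PySem.Set.add s (i, j) else s) s) PySem.Set.empty

-- one dilation: grown = set(cur); add every in-bounds neighbour of every cell of cur
def pvDilate (n : Int) (cur : PySem.Set (Int × Int)) : PySem.Set (Int × Int) :=
  cur.foldl (fun grown c =>
    pvDelta.foldl (fun grown d =>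
      if pvInb n (c.1 + d.1) (c.2 + d.2) then PySem.Set.add grown (c.1 + d.1, c.2 + d.2)
      else grown) grown)
    (PySem.Set.ofList cur)

-- `while cur != prev:` — same totality fuel as A's loop, not exhausted on Pre_ inputs
def pvLoopB (n : Int) : Nat → PySem.Set (Int × Int) → PySem.Set (Int × Int) → Int → Int
  | 0, _, _, k => k - 1
  | fuel+1, cur, prev, k =>
    if PySem.Set.equal cur prev then k - 1
    else pvLoopB n fuel (pvDilate n cur) cur (k + 1)

def solution_alt (n : Int) (garden : List (List Int)) : Int :=
  pvLoopB n (n.toNat * n.toNat + 1) (pvInit n garden) PySem.Set.empty 0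

-- ===== PRECONDITION & SPEC =====
-- Pre_ excludes exactly the inputs where Python A raises IndexError: garden must have at
-- least n rows and each of the first n rows at least n entries (both programs index the
-- top-left n×n block only; for n ≤ 0 nothing is indexed and the condition is vacuous).
def Pre_solution (n : Int) (garden : List (List Int)) : Prop :=
  n ≤ garden.length ∧ ∀ row ∈ garden.take n.toNat, n ≤ row.length
instance (n : Int) (garden : List (List Int)) : Decidable (Pre_solution n garden) := by
  unfold Pre_solution; infer_instance
def pvWitness_solution : Int × List (List Int) := (2, [[1, 0], [0, 0]])

def Spec_solution (n : Int) (garden : List (List Int)) (out : Int) : Prop := out = solution_alt n garden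
instance (n : Int) (garden : List (List Int)) (out : Int) : Decidable (Spec_solution n garden out) := by unfold Spec_solution; infer_instance

-- ===== CLAIM (what is proved, stated in full; the proofs are below) =====
def Claim_equal_solution : Prop := ∀ (n : Int) (garden : List (List Int)), Dom_solution n garden → Pre_solution n garden → Spec_solution n garden (solution n garden)

-- ===== LEMMAS AND PROOFS =====

-- the filled-cells set of a grid, restricted to the n×n block
def pvFilled (n : Int) (g : List (List Int)) (p : Int × Int) : Prop :=
  pvInb n p.1 p.2 ∧ pvCell g p.1 p.2 ≠ 0

-- p is an in-bounds grid neighbour of some cell of l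
def pvNbr (n : Int) (l : List (Int × Int)) (p : Int × Int) : Prop :=
  pvInb n p.1 p.2 ∧ ∃ c ∈ l, ∃ d ∈ pvDelta, p = (c.1 + d.1, c.2 + d.2)

theorem pvRow_eq {n : Int} {g : List (List Int)} {i : Int} (hg : n ≤ g.length)
    (h0 : 0 ≤ i) (h1 : i < n) : pvRow g i = g[i.toNat]'(by omega) := by
  unfold pvRow
  rw [PySem.List.pyGetD_eq_getElem _ _ h0 (by omega)]

theorem pvRow_len {n : Int} {g : List (List Int)} {i : Int} (hs : Pre_solution n g)
    (h0 : 0 ≤ i) (h1 : i < n) : n ≤ (pvRow g i).length := by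
  rw [pvRow_eq hs.1 h0 h1]
  apply hs.2
  have hi : i.toNat < g.length := by have := hs.1; omega
  have : g[i.toNat] = (g.take n.toNat)[i.toNat]'(by simp; omega) := by
    simp [List.getElem_take]
  rw [this]
  exact List.getElem_mem _

theorem pvShape_mark {n : Int} {g : List (List Int)} {y x : Int}
    (hs : Pre_solution n g) (hyx : pvInb n y x) : Pre_solution n (pvMark g y x) := by
  obtain ⟨hy0, hyn, hx0, hxn⟩ := hyx
  refine ⟨by simp [pvMark]; exact hs.1, ?_⟩
  intro row hrow
  rw [List.mem_iff_getElem] at hrow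
  obtain ⟨i, hi, hrow⟩ := hrow
  simp [pvMark] at hi
  rw [List.getElem_take] at hrow
  unfold pvMark at hrow
  rw [List.getElem_set] at hrow
  split at hrow
  · subst hrow; rw [List.length_set]; exact pvRow_len hs hy0 hyn
  · subst hrow
    apply hs.2
    have : g[i]'(by omega) = (g.take n.toNat)[i]'(by simp; omega) := by
      simp [List.getElem_take]
    rw [this]; exact List.getElem_mem _

theorem pvCell_mark {n : Int} {g : List (List Int)} {y x i j : Int}
    (hs : Pre_solution n g) (hyx : pvInb n y x) (hij : pvInb n i j) :
    (pvCell (pvMark g y x) i j ≠ 0 ↔ pvCell g i j ≠ 0 ∨ (i = y ∧ j = x)) := by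
  obtain ⟨hy0, hyn, hx0, hxn⟩ := hyx
  obtain ⟨hi0, hin, hj0, hjn⟩ := hij
  have hrowlen : n ≤ (pvRow g i).length := pvRow_len hs hi0 hin
  have hrowleny : n ≤ (pvRow g y).length := pvRow_len hs hy0 hyn
  have hglen := hs.1
  have hrowm : pvRow (pvMark g y x) i =
      if y.toNat = i.toNat then (pvRow g y).set x.toNat 1 else pvRow g i := by
    have h1 : pvRow (pvMark g y x) i = (pvMark g y x)[i.toNat]'(by simp [pvMark]; omega) :=
      pvRow_eq (by simp [pvMark]; omega) hi0 hin
    rw [h1]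
    unfold pvMark
    rw [List.getElem_set]
    split
    · simp_all
    · rw [pvRow_eq hs.1 hi0 hin]
  unfold pvCell
  rw [hrowm]
  split
  · rename_i hyi
    have hiy : i = y := by omega
    rw [PySem.List.pyGetD_eq_getElem _ _ hj0 (by simp; omega),
        PySem.List.pyGetD_eq_getElem _ _ hj0 (by omega)]
    rw [List.getElem_set]
    split
    · rename_i hxj
      have : j = x := by omega
      subst this hiy
      simp
    · have : ¬ (j = x) := by omega
      subst hiy
      simp [this]
  · rename_i hyi
    have : ¬ (i = y) := by omega
    simp [this]

theorem pvFlowers_mem {n : Int} {garden : List (List Int)} (p : Int × Int) :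
    p ∈ pvFlowers n garden ↔ pvFilled n garden p := by
  unfold pvFlowers
  have hinner : ∀ (i : Int) (js : List Int) (acc : List (Int × Int)),
      p ∈ js.foldl (fun acc j => if pvCell garden i j ≠ 0 then acc ++ [(i, j)] else acc) acc
      ↔ p ∈ acc ∨ ∃ j ∈ js, pvCell garden i j ≠ 0 ∧ p = (i, j) := by
    intro i js
    induction js with
    | nil => simp
    | cons j js ih =>
      intro acc
      rw [List.foldl_cons, ih]
      by_cases hc : pvCell garden i j ≠ 0
      · rw [if_pos hc]
        constructor
        · rintro (h | ⟨j', hj', h', rfl⟩)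
          · rcases List.mem_append.mp h with h | h
            · exact Or.inl h
            · exact Or.inr ⟨j, List.mem_cons_self, hc, by simpa using h⟩
          · exact Or.inr ⟨j', List.mem_cons_of_mem _ hj', h', rfl⟩
        · rintro (h | ⟨j', hj', h', rfl⟩)
          · exact Or.inl (List.mem_append.mpr (Or.inl h))
          · rcases List.mem_cons.mp hj' with rfl | hj'
            · exact Or.inl (List.mem_append.mpr (Or.inr (by simp)))
            · exact Or.inr ⟨j', hj', h', rfl⟩
      · rw [if_neg hc]
        constructor
        · rintro (h | ⟨j', hj', h', rfl⟩)
          · exact Or.inl h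
          · exact Or.inr ⟨j', List.mem_cons_of_mem _ hj', h', rfl⟩
        · rintro (h | ⟨j', hj', h', rfl⟩)
          · exact Or.inl h
          · rcases List.mem_cons.mp hj' with rfl | hj'
            · exact absurd h' hc
            · exact Or.inr ⟨j', hj', h', rfl⟩
  have houter : ∀ (is : List Int) (acc : List (Int × Int)),
      p ∈ is.foldl (fun acc i => (PySem.List.pyRange 0 n).foldl
        (fun acc j => if pvCell garden i j ≠ 0 then acc ++ [(i, j)] else acc) acc) acc
      ↔ p ∈ acc ∨ ∃ i ∈ is, ∃ j ∈ PySem.List.pyRange 0 n, pvCell garden i j ≠ 0 ∧ p = (i, j) := by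
    intro is
    induction is with
    | nil => simp
    | cons i is ih =>
      intro acc
      rw [List.foldl_cons, ih, hinner]
      constructor
      · rintro ((h | ⟨j, hj, hc, rfl⟩) | ⟨i', hi', hrest⟩)
        · exact Or.inl h
        · exact Or.inr ⟨i, List.mem_cons_self, j, hj, hc, rfl⟩
        · exact Or.inr ⟨i', List.mem_cons_of_mem _ hi', hrest⟩
      · rintro (h | ⟨i', hi', hrest⟩)
        · exact Or.inl (Or.inl h)
        · rcases List.mem_cons.mp hi' with rfl | hi'
          · exact Or.inl (Or.inr hrest)
          · exact Or.inr ⟨i', hi', hrest⟩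
  rw [houter]
  simp only [PySem.List.mem_pyRange_one, List.not_mem_nil, false_or]
  constructor
  · rintro ⟨i, ⟨hi0, hin⟩, j, ⟨hj0, hjn⟩, hc, rfl⟩
    exact ⟨⟨hi0, hin, hj0, hjn⟩, hc⟩
  · rintro ⟨⟨hi0, hin, hj0, hjn⟩, hc⟩
    exact ⟨p.1, ⟨hi0, hin⟩, p.2, ⟨hj0, hjn⟩, hc, rfl⟩

theorem pvInit_mem {n : Int} {garden : List (List Int)} (p : Int × Int) :
    p ∈ pvInit n garden ↔ pvFilled n garden p := by
  unfold pvInit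
  have hinner : ∀ (i : Int) (js : List Int) (s : PySem.Set (Int × Int)),
      p ∈ js.foldl (fun s j => if pvCell garden i j ≠ 0 then PySem.Set.add s (i, j) else s) s
      ↔ p ∈ s ∨ ∃ j ∈ js, pvCell garden i j ≠ 0 ∧ p = (i, j) := by
    intro i js
    induction js with
    | nil => simp
    | cons j js ih =>
      intro s
      rw [List.foldl_cons, ih]
      by_cases hc : pvCell garden i j ≠ 0
      · rw [if_pos hc]
        constructor
        · rintro (h | ⟨j', hj', h', rfl⟩)
          · rcases (PySem.Set.mem_add _ _ _).mp h with h | rfl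
            · exact Or.inl h
            · exact Or.inr ⟨j, List.mem_cons_self, hc, rfl⟩
          · exact Or.inr ⟨j', List.mem_cons_of_mem _ hj', h', rfl⟩
        · rintro (h | ⟨j', hj', h', rfl⟩)
          · exact Or.inl ((PySem.Set.mem_add _ _ _).mpr (Or.inl h))
          · rcases List.mem_cons.mp hj' with rfl | hj'
            · exact Or.inl ((PySem.Set.mem_add _ _ _).mpr (Or.inr rfl))
            · exact Or.inr ⟨j', hj', h', rfl⟩
      · rw [if_neg hc]
        constructor
        · rintro (h | ⟨j', hj', h', rfl⟩)
          · exact Or.inl h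
          · exact Or.inr ⟨j', List.mem_cons_of_mem _ hj', h', rfl⟩
        · rintro (h | ⟨j', hj', h', rfl⟩)
          · exact Or.inl h
          · rcases List.mem_cons.mp hj' with rfl | hj'
            · exact absurd h' hc
            · exact Or.inr ⟨j', hj', h', rfl⟩
  have houter : ∀ (is : List Int) (s : PySem.Set (Int × Int)),
      p ∈ is.foldl (fun s i => (PySem.List.pyRange 0 n).foldl
        (fun s j => if pvCell garden i j ≠ 0 then PySem.Set.add s (i, j) else s) s) s
      ↔ p ∈ s ∨ ∃ i ∈ is, ∃ j ∈ PySem.List.pyRange 0 n, pvCell garden i j ≠ 0 ∧ p = (i, j) := by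
    intro is
    induction is with
    | nil => simp
    | cons i is ih =>
      intro s
      rw [List.foldl_cons, ih, hinner]
      constructor
      · rintro ((h | ⟨j, hj, hc, rfl⟩) | ⟨i', hi', hrest⟩)
        · exact Or.inl h
        · exact Or.inr ⟨i, List.mem_cons_self, j, hj, hc, rfl⟩
        · exact Or.inr ⟨i', List.mem_cons_of_mem _ hi', hrest⟩
      · rintro (h | ⟨i', hi', hrest⟩)
        · exact Or.inl (Or.inl h)
        · rcases List.mem_cons.mp hi' with rfl | hi'
          · exact Or.inl (Or.inr hrest)
          · exact Or.inr ⟨i', hi', hrest⟩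
  rw [houter]
  simp only [PySem.List.mem_pyRange_one]
  constructor
  · rintro (h | ⟨i, ⟨hi0, hin⟩, j, ⟨hj0, hjn⟩, hc, rfl⟩)
    · simp [PySem.Set.empty] at h
    · exact ⟨⟨hi0, hin, hj0, hjn⟩, hc⟩
  · rintro ⟨⟨hi0, hin, hj0, hjn⟩, hc⟩
    exact Or.inr ⟨p.1, ⟨hi0, hin⟩, p.2, ⟨hj0, hjn⟩, hc, rfl⟩

theorem pvDilate_mem {n : Int} (cur : PySem.Set (Int × Int)) (p : Int × Int) :
    p ∈ pvDilate n cur ↔ p ∈ cur ∨ pvNbr n cur p := by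
  unfold pvDilate
  have hinner : ∀ (c : Int × Int) (ds : List (Int × Int)) (s : PySem.Set (Int × Int)),
      p ∈ ds.foldl (fun grown d =>
        if pvInb n (c.1 + d.1) (c.2 + d.2) then PySem.Set.add grown (c.1 + d.1, c.2 + d.2)
        else grown) s
      ↔ p ∈ s ∨ ∃ d ∈ ds, pvInb n (c.1 + d.1) (c.2 + d.2) ∧ p = (c.1 + d.1, c.2 + d.2) := by
    intro c ds
    induction ds with
    | nil => simp
    | cons d ds ih =>
      intro s
      rw [List.foldl_cons, ih]
      by_cases hb : pvInb n (c.1 + d.1) (c.2 + d.2)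
      · rw [if_pos hb]
        constructor
        · rintro (h | ⟨d', hd', hb', rfl⟩)
          · rcases (PySem.Set.mem_add _ _ _).mp h with h | rfl
            · exact Or.inl h
            · exact Or.inr ⟨d, List.mem_cons_self, hb, rfl⟩
          · exact Or.inr ⟨d', List.mem_cons_of_mem _ hd', hb', rfl⟩
        · rintro (h | ⟨d', hd', hb', rfl⟩)
          · exact Or.inl ((PySem.Set.mem_add _ _ _).mpr (Or.inl h))
          · rcases List.mem_cons.mp hd' with rfl | hd'
            · exact Or.inl ((PySem.Set.mem_add _ _ _).mpr (Or.inr rfl))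
            · exact Or.inr ⟨d', hd', hb', rfl⟩
      · rw [if_neg hb]
        constructor
        · rintro (h | ⟨d', hd', hb', rfl⟩)
          · exact Or.inl h
          · exact Or.inr ⟨d', List.mem_cons_of_mem _ hd', hb', rfl⟩
        · rintro (h | ⟨d', hd', hb', rfl⟩)
          · exact Or.inl h
          · rcases List.mem_cons.mp hd' with rfl | hd'
            · exact absurd hb' hb
            · exact Or.inr ⟨d', hd', hb', rfl⟩
  have houter : ∀ (l : List (Int × Int)) (s : PySem.Set (Int × Int)),
      p ∈ l.foldl (fun grown c =>
        pvDelta.foldl (fun grown d =>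
          if pvInb n (c.1 + d.1) (c.2 + d.2) then PySem.Set.add grown (c.1 + d.1, c.2 + d.2)
          else grown) grown) s
      ↔ p ∈ s ∨ ∃ c ∈ l, ∃ d ∈ pvDelta,
          pvInb n (c.1 + d.1) (c.2 + d.2) ∧ p = (c.1 + d.1, c.2 + d.2) := by
    intro l
    induction l with
    | nil => simp
    | cons c l ih =>
      intro s
      rw [List.foldl_cons, ih, hinner]
      constructor
      · rintro ((h | ⟨d, hd, hb, rfl⟩) | ⟨c', hc', hrest⟩)
        · exact Or.inl h
        · exact Or.inr ⟨c, List.mem_cons_self, d, hd, hb, rfl⟩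
        · exact Or.inr ⟨c', List.mem_cons_of_mem _ hc', hrest⟩
      · rintro (h | ⟨c', hc', hrest⟩)
        · exact Or.inl (Or.inl h)
        · rcases List.mem_cons.mp hc' with rfl | hc'
          · exact Or.inl (Or.inr hrest)
          · exact Or.inr ⟨c', hc', hrest⟩
  rw [houter, PySem.Set.mem_ofList]
  unfold pvNbr
  constructor
  · rintro (h | ⟨c, hc, d, hd, hb, rfl⟩)
    · exact Or.inl h
    · exact Or.inr ⟨hb, c, hc, d, hd, rfl⟩
  · rintro (h | ⟨hb, c, hc, d, hd, rfl⟩)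
    · exact Or.inl h
    · exact Or.inr ⟨c, hc, d, hd, hb, rfl⟩

-- one popped cell: processing the four directions marks and appends exactly the
-- in-bounds neighbours of c that were unfilled in the round's reference grid g0
theorem pvStepCell_spec {n : Int} {g0 : List (List Int)} (c : Int × Int) :
    ∀ (ds : List (Int × Int)) (st : List (List Int) × List (Int × Int)),
      Pre_solution n st.1 →
      (∀ p, pvInb n p.1 p.2 → (pvCell st.1 p.1 p.2 ≠ 0 ↔ pvCell g0 p.1 p.2 ≠ 0 ∨ p ∈ st.2)) →
      Pre_solution n (ds.foldl (fun st d =>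
        if pvInb n (c.1 + d.1) (c.2 + d.2) then
          if pvCell st.1 (c.1 + d.1) (c.2 + d.2) = 0 then
            (pvMark st.1 (c.1 + d.1) (c.2 + d.2), st.2 ++ [(c.1 + d.1, c.2 + d.2)])
          else st
        else st) st).1 ∧
      (∀ p, pvInb n p.1 p.2 → (pvCell (ds.foldl (fun st d =>
        if pvInb n (c.1 + d.1) (c.2 + d.2) then
          if pvCell st.1 (c.1 + d.1) (c.2 + d.2) = 0 then
            (pvMark st.1 (c.1 + d.1) (c.2 + d.2), st.2 ++ [(c.1 + d.1, c.2 + d.2)])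
          else st
        else st) st).1 p.1 p.2 ≠ 0 ↔ pvCell g0 p.1 p.2 ≠ 0 ∨ p ∈ (ds.foldl (fun st d =>
        if pvInb n (c.1 + d.1) (c.2 + d.2) then
          if pvCell st.1 (c.1 + d.1) (c.2 + d.2) = 0 then
            (pvMark st.1 (c.1 + d.1) (c.2 + d.2), st.2 ++ [(c.1 + d.1, c.2 + d.2)])
          else st
        else st) st).2)) ∧
      (∀ p, p ∈ (ds.foldl (fun st d =>
        if pvInb n (c.1 + d.1) (c.2 + d.2) then
          if pvCell st.1 (c.1 + d.1) (c.2 + d.2) = 0 then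
            (pvMark st.1 (c.1 + d.1) (c.2 + d.2), st.2 ++ [(c.1 + d.1, c.2 + d.2)])
          else st
        else st) st).2 ↔ p ∈ st.2 ∨ (pvCell g0 p.1 p.2 = 0 ∧ pvInb n p.1 p.2 ∧
          ∃ d ∈ ds, p = (c.1 + d.1, c.2 + d.2))) := by
  intro ds
  induction ds with
  | nil =>
    intro st hpre hinv
    refine ⟨hpre, hinv, fun p => ?_⟩
    simp
  | cons d ds ih =>
    intro st hpre hinv
    simp only [List.foldl_cons]
    by_cases hb : pvInb n (c.1 + d.1) (c.2 + d.2)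
    · rw [if_pos hb]
      by_cases hz : pvCell st.1 (c.1 + d.1) (c.2 + d.2) = 0
      · rw [if_pos hz]
        have h5 : ¬ (pvCell g0 (c.1 + d.1) (c.2 + d.2) ≠ 0 ∨
            (c.1 + d.1, c.2 + d.2) ∈ st.2) :=
          mt (hinv (c.1 + d.1, c.2 + d.2) hb).mpr (by simp [hz])
        push Not at h5
        have hinv' : ∀ p, pvInb n p.1 p.2 →
            (pvCell (pvMark st.1 (c.1 + d.1) (c.2 + d.2)) p.1 p.2 ≠ 0 ↔
              pvCell g0 p.1 p.2 ≠ 0 ∨ p ∈ st.2 ++ [(c.1 + d.1, c.2 + d.2)]) := by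
          intro p hp
          rw [pvCell_mark hpre hb hp, hinv p hp]
          simp only [List.mem_append, List.mem_singleton, Prod.ext_iff]
          tauto
        obtain ⟨h1, h2, h3⟩ := ih (pvMark st.1 (c.1 + d.1) (c.2 + d.2),
          st.2 ++ [(c.1 + d.1, c.2 + d.2)]) (pvShape_mark hpre hb) hinv'
        refine ⟨h1, h2, fun p => ?_⟩
        rw [h3]
        simp only [List.mem_append, List.mem_singleton]
        constructor
        · rintro ((h | rfl) | ⟨hz', hinb', d', hd', rfl⟩)
          · exact Or.inl h
          · exact Or.inr ⟨h5.1, hb, d, List.mem_cons_self, rfl⟩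
          · exact Or.inr ⟨hz', hinb', d', List.mem_cons_of_mem _ hd', rfl⟩
        · rintro (h | ⟨hz', hinb', d', hd', rfl⟩)
          · exact Or.inl (Or.inl h)
          · rcases List.mem_cons.mp hd' with rfl | hd'
            · exact Or.inl (Or.inr rfl)
            · exact Or.inr ⟨hz', hinb', d', hd', rfl⟩
      · rw [if_neg hz]
        obtain ⟨h1, h2, h3⟩ := ih st hpre hinv
        refine ⟨h1, h2, fun p => ?_⟩
        rw [h3]
        constructor
        · rintro (h | ⟨hz', hinb', d', hd', rfl⟩)
          · exact Or.inl h
          · exact Or.inr ⟨hz', hinb', d', List.mem_cons_of_mem _ hd', rfl⟩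
        · rintro (h | ⟨hz', hinb', d', hd', rfl⟩)
          · exact Or.inl h
          · rcases List.mem_cons.mp hd' with rfl | hd'
            · have := (hinv (c.1 + d'.1, c.2 + d'.2) hb)
              have hmem : (c.1 + d'.1, c.2 + d'.2) ∈ st.2 := by
                rcases this.mp hz with h | h
                · exact absurd hz' h
                · exact h
              exact Or.inl hmem
            · exact Or.inr ⟨hz', hinb', d', hd', rfl⟩
    · rw [if_neg hb]
      obtain ⟨h1, h2, h3⟩ := ih st hpre hinv
      refine ⟨h1, h2, fun p => ?_⟩
      rw [h3]
      constructor
      · rintro (h | ⟨hz', hinb', d', hd', rfl⟩)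
        · exact Or.inl h
        · exact Or.inr ⟨hz', hinb', d', List.mem_cons_of_mem _ hd', rfl⟩
      · rintro (h | ⟨hz', hinb', d', hd', rfl⟩)
        · exact Or.inl h
        · rcases List.mem_cons.mp hd' with rfl | hd'
          · exact absurd hinb' hb
          · exact Or.inr ⟨hz', hinb', d', hd', rfl⟩

-- the whole level: the appended queue is exactly the unfilled in-bounds neighbourhood
theorem pvLevel_spec {n : Int} {g0 : List (List Int)} :
    ∀ (q : List (Int × Int)) (st : List (List Int) × List (Int × Int)),
      Pre_solution n st.1 →
      (∀ p, pvInb n p.1 p.2 → (pvCell st.1 p.1 p.2 ≠ 0 ↔ pvCell g0 p.1 p.2 ≠ 0 ∨ p ∈ st.2)) →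
      Pre_solution n (q.foldl (pvStepCell n) st).1 ∧
      (∀ p, pvInb n p.1 p.2 →
        (pvCell (q.foldl (pvStepCell n) st).1 p.1 p.2 ≠ 0 ↔
          pvCell g0 p.1 p.2 ≠ 0 ∨ p ∈ (q.foldl (pvStepCell n) st).2)) ∧
      (∀ p, p ∈ (q.foldl (pvStepCell n) st).2 ↔
        p ∈ st.2 ∨ (pvCell g0 p.1 p.2 = 0 ∧ pvNbr n q p)) := by
  intro q
  induction q with
  | nil =>
    intro st hpre hinv
    refine ⟨hpre, hinv, fun p => ?_⟩
    simp [pvNbr]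
  | cons c q ih =>
    intro st hpre hinv
    simp only [List.foldl_cons]
    obtain ⟨h1, h2, h3⟩ := pvStepCell_spec (n := n) (g0 := g0) c pvDelta st hpre hinv
    obtain ⟨h1', h2', h3'⟩ := ih (pvStepCell n st c) h1 (by
      intro p hp
      have := h2 p hp
      unfold pvStepCell
      exact this)
    refine ⟨h1', h2', fun p => ?_⟩
    rw [h3']
    have h3c : ∀ p, p ∈ (pvStepCell n st c).2 ↔ p ∈ st.2 ∨
        (pvCell g0 p.1 p.2 = 0 ∧ pvInb n p.1 p.2 ∧ ∃ d ∈ pvDelta, p = (c.1 + d.1, c.2 + d.2)) := by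
      intro p'
      unfold pvStepCell
      exact h3 p'
    rw [h3c]
    unfold pvNbr
    constructor
    · rintro ((h | ⟨hz', hinb', d', hd', rfl⟩) | ⟨hz', hinb', c', hc', d', hd', rfl⟩)
      · exact Or.inl h
      · exact Or.inr ⟨hz', hinb', c, List.mem_cons_self, d', hd', rfl⟩
      · exact Or.inr ⟨hz', hinb', c', List.mem_cons_of_mem _ hc', d', hd', rfl⟩
    · rintro (h | ⟨hz', hinb', c', hc', d', hd', rfl⟩)
      · exact Or.inl (Or.inl h)
      · rcases List.mem_cons.mp hc' with rfl | hc'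
        · exact Or.inl (Or.inr ⟨hz', hinb', d', hd', rfl⟩)
        · exact Or.inr ⟨hz', hinb', c', hc', d', hd', rfl⟩

-- the simulation invariant between A's state (g, q) and B's state (cur, prev)
def pvInv (n : Int) (g : List (List Int)) (q : List (Int × Int))
    (cur prev : PySem.Set (Int × Int)) : Prop :=
  Pre_solution n g ∧
  (∀ p, p ∈ cur ↔ pvFilled n g p) ∧
  (∀ p, p ∈ q ↔ (p ∈ cur ∧ p ∉ prev)) ∧
  (∀ p ∈ prev, p ∈ cur) ∧
  (∀ p, pvNbr n prev p → p ∈ cur)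

theorem pvInv_step {n : Int} {g : List (List Int)} {q : List (Int × Int)}
    {cur prev : PySem.Set (Int × Int)} (h : pvInv n g q cur prev) :
    pvInv n (pvLevel n g q).1 (pvLevel n g q).2 (pvDilate n cur) cur := by
  obtain ⟨hpre, hcur, hq, hsub, hnbr⟩ := h
  have hq_sub : ∀ p, p ∈ q → p ∈ cur := fun p hp => ((hq p).mp hp).1
  obtain ⟨h1, h2, h3⟩ := pvLevel_spec (n := n) (g0 := g) q (g, []) hpre
    (by intro p _; simp)
  have hlev1 := h1
  have hlev2 := h2
  have hlev3 : ∀ p, p ∈ (pvLevel n g q).2 ↔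
      (pvCell g p.1 p.2 = 0 ∧ pvNbr n q p) := by
    intro p
    unfold pvLevel
    rw [h3 p]
    simp
  -- membership in the dilated set, in terms of the old grid
  have hdil : ∀ p, p ∈ pvDilate n cur ↔ pvFilled n g p ∨ (pvCell g p.1 p.2 = 0 ∧ pvNbr n q p) := by
    intro p
    rw [pvDilate_mem]
    constructor
    · rintro (h | ⟨hinb, c, hc, d, hd, rfl⟩)
      · exact Or.inl ((hcur p).mp h)
      · -- a neighbour of cur: either c is in q or c ∈ prev (then p ∈ cur already)
        by_cases hpc : (c.1 + d.1, c.2 + d.2) ∈ cur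
        · exact Or.inl ((hcur _).mp hpc)
        · have hcq : c ∈ q := by
            rw [hq c]
            refine ⟨hc, fun hcprev => ?_⟩
            exact hpc (hnbr _ ⟨hinb, c, hcprev, d, hd, rfl⟩)
          have hz : pvCell g (c.1 + d.1) (c.2 + d.2) = 0 := by
            by_contra hnz
            exact hpc ((hcur _).mpr ⟨hinb, hnz⟩)
          exact Or.inr ⟨hz, hinb, c, hcq, d, hd, rfl⟩
    · rintro (h | ⟨hz, hinb, c, hc, d, hd, rfl⟩)
      · exact Or.inl ((hcur p).mpr h)
      · exact Or.inr ⟨hinb, c, hq_sub c hc, d, hd, rfl⟩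
  refine ⟨hlev1, ?_, ?_, ?_, ?_⟩
  · -- new cur describes the new grid
    intro p
    rw [hdil p]
    unfold pvFilled
    constructor
    · rintro (⟨hinb, hnz⟩ | ⟨hz, hinb, hnbr'⟩)
      · exact ⟨hinb, (hlev2 p hinb).mpr (Or.inl hnz)⟩
      · exact ⟨hinb, (hlev2 p hinb).mpr (Or.inr ((hlev3 p).mpr ⟨hz, hinb, hnbr'⟩))⟩
    · rintro ⟨hinb, hnz⟩
      rcases (hlev2 p hinb).mp hnz with h | h
      · exact Or.inl ⟨hinb, h⟩
      · have := (hlev3 p).mp h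
        exact Or.inr ⟨this.1, hinb, this.2.2⟩
  · -- the new queue is the new cur minus the old cur
    intro p
    rw [hlev3 p, hdil p]
    unfold pvFilled
    constructor
    · rintro ⟨hz, hinb, hnbr'⟩
      refine ⟨Or.inr ⟨hz, hinb, hnbr'⟩, fun hpcur => ?_⟩
      exact absurd ((hcur p).mp hpcur).2 (by simp [hz])
    · rintro ⟨h | ⟨hz, hinb, hnbr'⟩, hnot⟩
      · exact absurd ((hcur p).mpr h) hnot
      · exact ⟨hz, hinb, hnbr'⟩
  · intro p hp
    rw [hdil p]
    exact Or.inl ((hcur p).mp hp)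
  · intro p hp
    rw [hdil p]
    obtain ⟨hinb, c, hc, d, hd, rfl⟩ := hp
    by_cases hz : pvCell g (c.1 + d.1) (c.2 + d.2) = 0
    · by_cases hpc : (c.1 + d.1, c.2 + d.2) ∈ cur
      · exact Or.inl ((hcur _).mp hpc)
      · have hcq : c ∈ q := by
          rw [hq c]
          exact ⟨hc, fun hcprev => hpc (hnbr _ ⟨hinb, c, hcprev, d, hd, rfl⟩)⟩
        exact Or.inr ⟨hz, hinb, c, hcq, d, hd, rfl⟩
    · exact Or.inl ⟨hinb, hz⟩

theorem pvSim {n : Int} : ∀ (fuel : Nat) (g : List (List Int)) (q : List (Int × Int))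
    (cur prev : PySem.Set (Int × Int)) (k : Int), pvInv n g q cur prev →
    pvLoopA n fuel g q k = pvLoopB n fuel cur prev k := by
  intro fuel
  induction fuel with
  | zero => intro g q cur prev k _; rfl
  | succ fuel ih =>
    intro g q cur prev k h
    have hiff : (q = []) ↔ (PySem.Set.equal cur prev = true) := by
      obtain ⟨_, _, hq, hsub, _⟩ := h
      rw [PySem.Set.equal_iff]
      constructor
      · intro hnil x
        refine ⟨fun hx => ?_, fun hx => hsub x hx⟩
        by_contra hxp
        have : x ∈ q := (hq x).mpr ⟨hx, hxp⟩
        simp [hnil] at this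
      · intro hext
        rw [List.eq_nil_iff_forall_not_mem]
        intro p hp
        obtain ⟨hpc, hpp⟩ := (hq p).mp hp
        exact hpp ((hext p).mp hpc)
    rw [pvLoopA, pvLoopB]
    by_cases hq : q = []
    · rw [if_pos hq, if_pos (hiff.mp hq)]
    · rw [if_neg hq, if_neg (fun he => hq (hiff.mpr he))]
      exact ih _ _ _ _ _ (pvInv_step h)

-- ===== VERDICT (by name: the statement is the Claim_ definition above) =====
theorem solution_spec : Claim_equal_solution := by
  intro n garden _ hpre
  unfold Spec_solution solution solution_alt
  apply pvSim
  refine ⟨hpre, fun p => pvInit_mem p, fun p => ?_, by simp [PySem.Set.empty], fun p hp => ?_⟩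
  · simp [pvFlowers_mem, pvInit_mem, PySem.Set.empty]
  · rcases hp with ⟨_, c, hc, _⟩
    simp [PySem.Set.empty] at hc
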